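-- pv_equiv track=rewrite | github.com/caihaocheng-caihaocheng/FYP-Django | NRE/NER/all_function.py | format_bert_ner
-- ===== SOURCE A (Python) =====
-- def BERT_return_entity(words_raw, preds):
--     """
--     Maximun for 2 entities
--     input: words_raw, preds. Both are list class
--     output entity1, entity2
--     """
--     # count how many entity is in the sentence
--     count = 0
--     for i in range(len(preds)):
--         if("B-" in preds[i]):
--             count += 1
--     #==========================================
--
--     if count == 0:
--         entity1 = entity2 ='"' + "No entity is suggested!" + '"'
--         return entity1, entity2
--     elif count == 1:
--         temp1 = []
--         for i in range(len(preds)):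
--             if(preds[i] != "O"):
--                 temp1.append(words_raw[i])
--             else:
--                 pass
--         entity1 = " ".join(temp1)
--         entity2 = '"' + "No entity is suggested" + '"'
--         return entity1, entity2
--     elif count==2:
--         temp1 = []
--         temp2 = []
--         temp3 = []
--         for i in range(len(preds)):
--             #遇到以B- 开头的， 先检查temp3 是否为空，空既是里面的是entity1， 否则将temp3 加入到temp1， 然后清空，再放入temp2
--             if("B-" in preds[i]):
--                 if (len(temp3) != 0 ):
--                     for w in range(len(temp3)):
--                         temp1.append(temp3[w])
--                     temp3.clear()
--                     temp3.append(words_raw[i])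
--                 elif(len(temp3) == 0):
--                     temp3.append(words_raw[i])
--             elif("I-" in preds[i]):
--                 temp3.append(words_raw[i])
--             else:
--                 pass
--         for i in range(len(temp3)):
--             temp2.append(temp3[i])
--         entity1 = " ".join(temp1)
--         entity2 = " ".join(temp2)
--         return entity1, entity2
--     else:
--         entity1 = entity2 = '"' + "Entity exceeded" + '"'
--         return entity1, entity2
--     return entity1, entity2
--
-- def format_bert_ner(input_total_result):
--     """
--     The input should be the result from fun BERT_split_para_predict
--     output:
--     1. A whole sentence,
--     2. head and tail in order to use relation extraction
--     Can use list of dictionary as output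
--     Example: [[{"sentence":*****, "head": **, "tail": **}],
--     [{"sentence":*****, "head": **, "tail": **}],
--     [{"sentence":*****, "head": **, "tail": **}]]
--     """
--     format_result = []
--     for i in range(len(input_total_result)):
--         sentence = " ".join(input_total_result[i][0])
--         h, t = BERT_return_entity(input_total_result[i][0], input_total_result[i][1])
--         dic = {"sentence": sentence, "head": h, "tail": t}
--         format_result.append(dic)
--     return format_result
-- ===== SOURCE B (Python) =====
-- def format_bert_ner(input_total_result):
--     format_result = []
--     for group in input_total_result:
--         words, preds = group[0], group[1]
--         b_idxs = [i for i, p in enumerate(preds) if "B-" in p]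
--         if len(b_idxs) == 0:
--             h = t = '"No entity is suggested!"'
--         elif len(b_idxs) == 1:
--             h = " ".join(words[i] for i, p in enumerate(preds) if p != "O")
--             t = '"No entity is suggested"'
--         elif len(b_idxs) == 2:
--             last = b_idxs[1]
--             keep = [i for i, p in enumerate(preds) if "B-" in p or "I-" in p]
--             h = " ".join(words[i] for i in keep if i < last)
--             t = " ".join(words[i] for i in keep if i >= last)
--         else:
--             h = t = '"Entity exceeded"'
--         format_result.append({"sentence": " ".join(words), "head": h, "tail": t})
--     return format_result
-- ===== Notes on version B (the rewrite author's own statement) =====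
-- stated objective: simpler
-- what changed: Replaces the three-buffer flush state machine of BERT_return_entity (and its index loops) with index-list comprehensions: collect the indices of 'B-' labels once, and for the two-entity case split the kept B-/I- word indices at the second 'B-' index instead of flushing buffers.
import Mathlib
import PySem

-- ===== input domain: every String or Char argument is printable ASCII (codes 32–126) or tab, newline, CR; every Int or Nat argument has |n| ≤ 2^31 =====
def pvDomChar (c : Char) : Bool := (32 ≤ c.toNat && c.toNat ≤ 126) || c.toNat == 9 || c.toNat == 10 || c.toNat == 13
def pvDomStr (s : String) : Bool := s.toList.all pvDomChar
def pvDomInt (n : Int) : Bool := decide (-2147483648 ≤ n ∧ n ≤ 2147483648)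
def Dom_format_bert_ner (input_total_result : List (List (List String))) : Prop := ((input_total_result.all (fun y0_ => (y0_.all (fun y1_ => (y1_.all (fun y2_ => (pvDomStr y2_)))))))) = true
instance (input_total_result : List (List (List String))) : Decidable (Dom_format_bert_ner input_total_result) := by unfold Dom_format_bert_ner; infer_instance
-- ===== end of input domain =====

-- B replaces A's three-buffer flush state machine by index-list comprehensions (split the kept
-- B-/I- indices at the second "B-" index); objective: simpler.

-- ===== PORT A =====
-- literal port of BERT_return_entity (words_raw, preds)
def BERT_return_entity (words_raw preds : List String) : String × String :=
  -- count how many entities are in the sentence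
  let count : Int := (PySem.List.pyRange 0 (preds.length : Int) 1).foldl
    (fun c i => if PySem.Str.isIn "B-" (PySem.List.pyGetD preds i "") then c + 1 else c) 0
  if count = 0 then
    ("\"No entity is suggested!\"", "\"No entity is suggested!\"")
  else if count = 1 then
    let temp1 := (PySem.List.pyRange 0 (preds.length : Int) 1).foldl
      (fun t i => if PySem.List.pyGetD preds i "" ≠ "O" then t ++ [PySem.List.pyGetD words_raw i ""] else t) []
    (PySem.Str.join " " temp1, "\"No entity is suggested\"")
  else if count = 2 then
    let st := (PySem.List.pyRange 0 (preds.length : Int) 1).foldl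
      (fun (st : List String × List String) i =>
        if PySem.Str.isIn "B-" (PySem.List.pyGetD preds i "") then
          if st.2.length ≠ 0 then
            -- flush temp3 into temp1 (element-copy loop), clear, then append words_raw[i]
            ((PySem.List.pyRange 0 (st.2.length : Int) 1).foldl
               (fun t w => t ++ [PySem.List.pyGetD st.2 w ""]) st.1,
             [PySem.List.pyGetD words_raw i ""])
          else (st.1, [PySem.List.pyGetD words_raw i ""])
        else if PySem.Str.isIn "I-" (PySem.List.pyGetD preds i "") then
          (st.1, st.2 ++ [PySem.List.pyGetD words_raw i ""])
        else st) ([], [])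
    let temp2 := (PySem.List.pyRange 0 (st.2.length : Int) 1).foldl
      (fun t i => t ++ [PySem.List.pyGetD st.2 i ""]) []
    (PySem.Str.join " " st.1, PySem.Str.join " " temp2)
  else
    ("\"Entity exceeded\"", "\"Entity exceeded\"")

def format_bert_ner (input_total_result : List (List (List String))) : List (List (String × String)) :=
  (PySem.List.pyRange 0 (input_total_result.length : Int) 1).foldl
    (fun acc i =>
      let grp := PySem.List.pyGetD input_total_result i []
      let sentence := PySem.Str.join " " (PySem.List.pyGetD grp 0 [])
      let ht := BERT_return_entity (PySem.List.pyGetD grp 0 []) (PySem.List.pyGetD grp 1 [])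
      acc ++ [[("sentence", sentence), ("head", ht.1), ("tail", ht.2)]]) []

-- ===== PORT B =====
-- loop body of Source B's single loop
def pvFmtGroup (grp : List (List String)) : List (String × String) :=
  let words := PySem.List.pyGetD grp 0 []
  let preds := PySem.List.pyGetD grp 1 []
  let bIdxs := ((PySem.List.enumerate preds 0).filter
      (fun q => PySem.Str.isIn "B-" q.2)).map (fun q => q.1)
  let ht : String × String :=
    if bIdxs.length = 0 then
      ("\"No entity is suggested!\"", "\"No entity is suggested!\"")
    else if bIdxs.length = 1 then
      (PySem.Str.join " " (((PySem.List.enumerate preds 0).filter (fun q => q.2 ≠ "O")).map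
         (fun q => PySem.List.pyGetD words q.1 "")),
       "\"No entity is suggested\"")
    else if bIdxs.length = 2 then
      let last := PySem.List.pyGetD bIdxs 1 0
      let keep := ((PySem.List.enumerate preds 0).filter
          (fun q => PySem.Str.isIn "B-" q.2 || PySem.Str.isIn "I-" q.2)).map (fun q => q.1)
      (PySem.Str.join " " ((keep.filter (fun i => i < last)).map (fun i => PySem.List.pyGetD words i "")),
       PySem.Str.join " " ((keep.filter (fun i => last ≤ i)).map (fun i => PySem.List.pyGetD words i "")))
    else ("\"Entity exceeded\"", "\"Entity exceeded\"")
  [("sentence", PySem.Str.join " " words), ("head", ht.1), ("tail", ht.2)]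

def format_bert_ner_alt (input_total_result : List (List (List String))) : List (List (String × String)) :=
  input_total_result.foldl (fun acc grp => acc ++ [pvFmtGroup grp]) []

-- ===== PRECONDITION & SPEC =====
-- Pre_ excludes exactly the inputs on which the Python A raises IndexError: a group shorter than 2,
-- or (in the one-entity branch) a non-"O" label, or (in the two-entity branch) a B-/I- label,
-- at an index beyond the word list.
def pvGroupReturns (g : List (List String)) : Bool :=
  decide (2 ≤ g.length) &&
  (let w := g.getD 0 []
   let p := g.getD 1 []
   let c := p.countP (fun s => PySem.Str.isIn "B-" s)
   if c = 1 then
     (PySem.List.enumerate p 0).all (fun q => q.2 == "O" || decide (q.1 < (w.length : Int)))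
   else if c = 2 then
     (PySem.List.enumerate p 0).all
       (fun q => !(PySem.Str.isIn "B-" q.2 || PySem.Str.isIn "I-" q.2) || decide (q.1 < (w.length : Int)))
   else true)

def Pre_format_bert_ner (input_total_result : List (List (List String))) : Prop :=
  ∀ g ∈ input_total_result, pvGroupReturns g = true
instance (input_total_result : List (List (List String))) : Decidable (Pre_format_bert_ner input_total_result) := by
  unfold Pre_format_bert_ner; infer_instance

def pvWitness_format_bert_ner : List (List (List String)) :=
  [[["alice", "met", "bob"], ["B-PER", "O", "B-PER"]]]

def Spec_format_bert_ner (input_total_result : List (List (List String))) (out : List (List (String × String))) : Prop := out = format_bert_ner_alt input_total_result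
instance (input_total_result : List (List (List String))) (out : List (List (String × String))) : Decidable (Spec_format_bert_ner input_total_result out) := by unfold Spec_format_bert_ner; infer_instance

-- ===== CLAIM (what is proved, stated in full; the proofs are below) =====
def Claim_equal_format_bert_ner : Prop := ∀ (input_total_result : List (List (List String))), Dom_format_bert_ner input_total_result → Pre_format_bert_ner input_total_result → Spec_format_bert_ner input_total_result (format_bert_ner input_total_result)



-- ===== LEMMAS AND PROOFS =====

set_option maxHeartbeats 1000000

-- B's head/tail computation, as pvFmtGroup computes it (proof-side name for the let `ht`)
def pvAltHT (words preds : List String) : String × String :=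
  let bIdxs := ((PySem.List.enumerate preds 0).filter
      (fun q => PySem.Str.isIn "B-" q.2)).map (fun q => q.1)
  if bIdxs.length = 0 then
    ("\"No entity is suggested!\"", "\"No entity is suggested!\"")
  else if bIdxs.length = 1 then
    (PySem.Str.join " " (((PySem.List.enumerate preds 0).filter (fun q => q.2 ≠ "O")).map
       (fun q => PySem.List.pyGetD words q.1 "")),
     "\"No entity is suggested\"")
  else if bIdxs.length = 2 then
    let last := PySem.List.pyGetD bIdxs 1 0
    let keep := ((PySem.List.enumerate preds 0).filter
        (fun q => PySem.Str.isIn "B-" q.2 || PySem.Str.isIn "I-" q.2)).map (fun q => q.1)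
    (PySem.Str.join " " ((keep.filter (fun i => i < last)).map (fun i => PySem.List.pyGetD words i "")),
     PySem.Str.join " " ((keep.filter (fun i => last ≤ i)).map (fun i => PySem.List.pyGetD words i "")))
  else ("\"Entity exceeded\"", "\"Entity exceeded\"")

theorem pvFmtGroup_eq (grp : List (List String)) :
    pvFmtGroup grp =
      [("sentence", PySem.Str.join " " (PySem.List.pyGetD grp 0 [])),
       ("head", (pvAltHT (PySem.List.pyGetD grp 0 []) (PySem.List.pyGetD grp 1 [])).1),
       ("tail", (pvAltHT (PySem.List.pyGetD grp 0 []) (PySem.List.pyGetD grp 1 [])).2)] := rfl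

-- A's count==2 loop step, abstracted over the label tests and the word accessor
def pvStep (Bf If : Int → Bool) (W : Int → String) (st : List String × List String) (j : Int) :
    List String × List String :=
  if Bf j then
    if st.2.length ≠ 0 then
      ((PySem.List.pyRange 0 (st.2.length : Int) 1).foldl
         (fun t w => t ++ [PySem.List.pyGetD st.2 w ""]) st.1,
       [W j])
    else (st.1, [W j])
  else if If j then (st.1, st.2 ++ [W j])
  else st

theorem pv_copy (xs : List String) (init : List String) :
    (PySem.List.pyRange 0 (xs.length : Int) 1).foldl
      (fun t w => t ++ [PySem.List.pyGetD xs w ""]) init = init ++ xs := by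
  rw [PySem.List.foldl_pyRange_zero_pyGetD' xs "" (fun t x => t ++ [x]) init]
  exact PySem.List.foldl_append_singleton_eq_self _ _

theorem pv_count (xs : List String) (p : String → Bool) :
    (PySem.List.pyRange 0 (xs.length : Int) 1).foldl
      (fun (c : Int) i => if p (PySem.List.pyGetD xs i "") then c + 1 else c) 0
      = (xs.countP p : Int) := by
  rw [PySem.List.foldl_pyRange_zero_pyGetD' xs "" (fun (c : Int) x => if p x then c + 1 else c) 0]
  rw [PySem.List.foldl_if_add_one]
  simp

theorem pv_enum (xs : List String) :
    PySem.List.enumerate xs 0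
      = (PySem.List.pyRange 0 (xs.length : Int) 1).map (fun j => (j, PySem.List.pyGetD xs j "")) := by
  have h := PySem.List.enumerate_eq_map_pyRange (xs := xs) ("" : String)
  simpa [PySem.List.len] using h

-- countP over the index range equals countP over the list itself
theorem pv_countP_range (xs : List String) (p : String → Bool) :
    (PySem.List.pyRange 0 (xs.length : Int) 1).countP
        (fun j => p (PySem.List.pyGetD xs j "")) = xs.countP p := by
  have h : (PySem.List.pyRange 0 (xs.length : Int) 1).map
      (fun j => PySem.List.pyGetD xs j "") = xs := by
    have := PySem.List.map_pyGetD_pyRange_zero' (xs := xs) ("" : String)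
    simpa [PySem.List.len] using this
  conv_rhs => rw [← h]
  rw [List.countP_map]
  rfl

-- B's B- index list is the filtered index range
theorem pv_bidxs (preds : List String) :
    ((PySem.List.enumerate preds 0).filter
        (fun q => PySem.Str.isIn "B-" q.2)).map (fun q => q.1)
      = (PySem.List.pyRange 0 (preds.length : Int) 1).filter
          (fun j => PySem.Str.isIn "B-" (PySem.List.pyGetD preds j "")) := by
  rw [pv_enum, List.filter_map, List.map_map]
  simp only [Function.comp_def]
  exact List.map_id' _

theorem pv_bidxs_len (preds : List String) :
    (((PySem.List.enumerate preds 0).filter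
        (fun q => PySem.Str.isIn "B-" q.2)).map (fun q => q.1)).length
      = preds.countP (fun s => PySem.Str.isIn "B-" s) := by
  rw [pv_bidxs, ← List.countP_eq_length_filter]
  exact pv_countP_range preds _

theorem pvStep_concat (Bf If : Int → Bool) (W : Int → String) (L : List Int) :
    ∀ t1 t3 : List String,
      (L.foldl (pvStep Bf If W) (t1, t3)).1 ++ (L.foldl (pvStep Bf If W) (t1, t3)).2
        = t1 ++ t3 ++ (L.filter (fun j => Bf j || If j)).map W := by
  induction L with
  | nil => intro t1 t3; simp
  | cons j L ih =>
    intro t1 t3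
    by_cases hB : Bf j = true
    · have hstep : pvStep Bf If W (t1, t3) j = (t1 ++ t3, [W j]) := by
        by_cases h3 : t3.length ≠ 0
        · unfold pvStep; rw [if_pos hB, if_pos h3, pv_copy]
        · have h3' : t3 = [] := by simpa using h3
          unfold pvStep; rw [if_pos hB, if_neg h3, h3']; simp
      rw [List.foldl_cons, hstep, ih, List.filter_cons]
      simp [hB]
    · by_cases hI : If j = true
      · have hstep : pvStep Bf If W (t1, t3) j = (t1, t3 ++ [W j]) := by
          unfold pvStep; rw [if_neg hB, if_pos hI]
        rw [List.foldl_cons, hstep, ih, List.filter_cons]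
        simp [hB, hI]
      · have hstep : pvStep Bf If W (t1, t3) j = (t1, t3) := by
          unfold pvStep; rw [if_neg hB, if_neg hI]
        rw [List.foldl_cons, hstep, ih, List.filter_cons]
        simp [hB, hI]

theorem pvStep_noB (Bf If : Int → Bool) (W : Int → String) (L : List Int)
    (h : ∀ j ∈ L, Bf j = false) :
    ∀ t1 t3 : List String,
      L.foldl (pvStep Bf If W) (t1, t3)
        = (t1, t3 ++ (L.filter (fun j => Bf j || If j)).map W) := by
  induction L with
  | nil => intro t1 t3; simp
  | cons j L ih =>
    intro t1 t3
    have hB : Bf j = false := h j (List.mem_cons_self ..)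
    have hrest : ∀ x ∈ L, Bf x = false := fun x hx => h x (List.mem_cons_of_mem _ hx)
    by_cases hI : If j = true
    · have hstep : pvStep Bf If W (t1, t3) j = (t1, t3 ++ [W j]) := by
        unfold pvStep; rw [if_neg (by simp [hB]), if_pos hI]
      rw [List.foldl_cons, hstep, ih hrest, List.filter_cons]
      simp [hB, hI]
    · have hstep : pvStep Bf If W (t1, t3) j = (t1, t3) := by
        unfold pvStep; rw [if_neg (by simp [hB]), if_neg hI]
      rw [List.foldl_cons, hstep, ih hrest, List.filter_cons]
      simp [hB, hI]

theorem pvStep_split (Bf If : Int → Bool) (W : Int → String) (P S : List Int) (j : Int)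
    (hB : Bf j = true) (hS : ∀ x ∈ S, Bf x = false) :
    (P ++ j :: S).foldl (pvStep Bf If W) ([], [])
      = ((P.filter (fun i => Bf i || If i)).map W,
         W j :: (S.filter (fun i => Bf i || If i)).map W) := by
  rw [List.foldl_append]
  set st := P.foldl (pvStep Bf If W) ([], []) with hst
  have hcat : st.1 ++ st.2 = (P.filter (fun i => Bf i || If i)).map W := by
    have := pvStep_concat Bf If W P [] []
    simpa [← hst] using this
  have hstep : pvStep Bf If W st j = (st.1 ++ st.2, [W j]) := by
    by_cases h3 : st.2.length ≠ 0
    · unfold pvStep; rw [if_pos hB, if_pos h3, pv_copy]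
    · have h3' : st.2 = [] := by simpa using h3
      unfold pvStep; rw [if_pos hB, if_neg h3, h3']; simp
  rw [List.foldl_cons, hstep, pvStep_noB Bf If W S hS, hcat]
  simp

-- the one-entity branch: A's append loop is B's filtered comprehension
theorem pv_branch1 (words preds : List String) :
    (PySem.List.pyRange 0 (preds.length : Int) 1).foldl
      (fun t i => if PySem.List.pyGetD preds i "" ≠ "O" then t ++ [PySem.List.pyGetD words i ""] else t) []
      = ((PySem.List.enumerate preds 0).filter (fun q => q.2 ≠ "O")).map
          (fun q => PySem.List.pyGetD words q.1 "") := by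
  rw [pv_enum, List.filter_map, List.map_map]
  rw [PySem.List.foldl_append_ite (p := fun i : Int => PySem.List.pyGetD preds i "" ≠ "O")
        (f := fun i => PySem.List.pyGetD words i "")]
  simp only [Function.comp_def, List.nil_append]

-- the two-entity case: A's buffer machine equals B's split at the second B- index
theorem pv_idxs (xs : List String) (p : String → Bool) :
    ((PySem.List.enumerate xs 0).filter (fun q => p q.2)).map (fun q => q.1)
      = (PySem.List.pyRange 0 (xs.length : Int) 1).filter
          (fun j => p (PySem.List.pyGetD xs j "")) := by
  rw [pv_enum, List.filter_map, List.map_map]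
  simp only [Function.comp_def]
  exact List.map_id' _

theorem pv_branch2 (words preds : List String)
    (h2 : preds.countP (fun s => PySem.Str.isIn "B-" s) = 2) :
    (let st := (PySem.List.pyRange 0 (preds.length : Int) 1).foldl
        (fun (st : List String × List String) i =>
          if PySem.Str.isIn "B-" (PySem.List.pyGetD preds i "") then
            if st.2.length ≠ 0 then
              ((PySem.List.pyRange 0 (st.2.length : Int) 1).foldl
                 (fun t w => t ++ [PySem.List.pyGetD st.2 w ""]) st.1,
               [PySem.List.pyGetD words i ""])
            else (st.1, [PySem.List.pyGetD words i ""])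
          else if PySem.Str.isIn "I-" (PySem.List.pyGetD preds i "") then
            (st.1, st.2 ++ [PySem.List.pyGetD words i ""])
          else st) ([], [])
     let temp2 := (PySem.List.pyRange 0 (st.2.length : Int) 1).foldl
        (fun t i => t ++ [PySem.List.pyGetD st.2 i ""]) []
     (PySem.Str.join " " st.1, PySem.Str.join " " temp2))
    = (let last := PySem.List.pyGetD
          (((PySem.List.enumerate preds 0).filter
              (fun q => PySem.Str.isIn "B-" q.2)).map (fun q => q.1)) 1 0
       let keep := ((PySem.List.enumerate preds 0).filter
          (fun q => PySem.Str.isIn "B-" q.2 || PySem.Str.isIn "I-" q.2)).map (fun q => q.1)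
       (PySem.Str.join " " ((keep.filter (fun i => i < last)).map (fun i => PySem.List.pyGetD words i "")),
        PySem.Str.join " " ((keep.filter (fun i => last ≤ i)).map (fun i => PySem.List.pyGetD words i "")))) := by
  rw [pv_idxs preds (fun s => PySem.Str.isIn "B-" s),
      pv_idxs preds (fun s => PySem.Str.isIn "B-" s || PySem.Str.isIn "I-" s)]
  set n : Int := (preds.length : Int) with hn
  set R := PySem.List.pyRange 0 n 1 with hR
  set Bf : Int → Bool := fun j => PySem.Str.isIn "B-" (PySem.List.pyGetD preds j "") with hBf
  set If : Int → Bool := fun j => PySem.Str.isIn "I-" (PySem.List.pyGetD preds j "") with hIf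
  set W : Int → String := fun j => PySem.List.pyGetD words j "" with hW
  have h2' : (R.filter Bf).length = 2 := by
    rw [← List.countP_eq_length_filter]
    rw [hBf, hR, hn]
    rw [pv_countP_range preds (fun s => PySem.Str.isIn "B-" s)]
    exact h2
  obtain ⟨a, b, hFB⟩ := List.length_eq_two.mp h2'
  have hbmem : b ∈ R.filter Bf := by rw [hFB]; simp
  have hbB : Bf b = true := (List.mem_filter.mp hbmem).2
  have hbR : b ∈ R := (List.mem_filter.mp hbmem).1
  have hbrange : 0 ≤ b ∧ b < n := by
    have := (PySem.List.mem_pyRange_one (a := 0) (b := n) (x := b)).mp (by rw [← hR]; exact hbR)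
    omega
  have hab : a < b := by
    have hpw : (R.filter Bf).Pairwise (· < ·) := by
      refine List.Pairwise.filter _ ?_
      rw [hR]
      exact PySem.List.pairwise_lt_pyRange_one 0 n
    rw [hFB] at hpw
    simpa using hpw
  set P := PySem.List.pyRange 0 b 1 with hP
  set S := PySem.List.pyRange (b + 1) n 1 with hSdef
  have hsplit : R = P ++ b :: S := by
    rw [hR, PySem.List.pyRange_one_append 0 b n (by omega) (by omega),
        PySem.List.pyRange_one_cons (a := b) (b := n) (by omega)]
  have hPmem : ∀ x ∈ P, x < b := by
    intro x hx
    have := (PySem.List.mem_pyRange_one (a := 0) (b := b) (x := x)).mp hx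
    omega
  have hSmem : ∀ x ∈ S, b < x := by
    intro x hx
    have := (PySem.List.mem_pyRange_one (a := b + 1) (b := n) (x := x)).mp hx
    omega
  have hnoS : ∀ x ∈ S, Bf x = false := by
    intro x hx
    by_contra hcon
    have hxB : Bf x = true := by simpa using hcon
    have hxFB : x ∈ R.filter Bf := List.mem_filter.mpr
      ⟨by rw [hsplit]; exact List.mem_append_right _ (List.mem_cons_of_mem _ hx), hxB⟩
    rw [hFB] at hxFB
    have hbx := hSmem x hx
    rcases List.mem_pair.mp hxFB with h | h <;> omega
  have hlast : PySem.List.pyGetD (R.filter Bf) 1 0 = b := by rw [hFB]; rfl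
  have hfold : R.foldl
      (fun (st : List String × List String) i =>
        if PySem.Str.isIn "B-" (PySem.List.pyGetD preds i "") then
          if st.2.length ≠ 0 then
            ((PySem.List.pyRange 0 (st.2.length : Int) 1).foldl
               (fun t w => t ++ [PySem.List.pyGetD st.2 w ""]) st.1,
             [PySem.List.pyGetD words i ""])
          else (st.1, [PySem.List.pyGetD words i ""])
        else if PySem.Str.isIn "I-" (PySem.List.pyGetD preds i "") then
          (st.1, st.2 ++ [PySem.List.pyGetD words i ""])
        else st) ([], [])
      = ((P.filter (fun i => Bf i || If i)).map W,
         W b :: (S.filter (fun i => Bf i || If i)).map W) := by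
    have heq : R.foldl
        (fun (st : List String × List String) i =>
          if PySem.Str.isIn "B-" (PySem.List.pyGetD preds i "") then
            if st.2.length ≠ 0 then
              ((PySem.List.pyRange 0 (st.2.length : Int) 1).foldl
                 (fun t w => t ++ [PySem.List.pyGetD st.2 w ""]) st.1,
               [PySem.List.pyGetD words i ""])
            else (st.1, [PySem.List.pyGetD words i ""])
          else if PySem.Str.isIn "I-" (PySem.List.pyGetD preds i "") then
            (st.1, st.2 ++ [PySem.List.pyGetD words i ""])
          else st) ([], [])
        = R.foldl (pvStep Bf If W) ([], []) := rfl
    rw [heq, hsplit]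
    exact pvStep_split Bf If W P S b hbB hnoS
  simp only [hfold, hlast]
  rw [pv_copy]
  set K : Int → Bool := fun i => Bf i || If i with hK
  have hKfilt : R.filter K = (P.filter K) ++ b :: (S.filter K) := by
    rw [hsplit, List.filter_append, List.filter_cons]
    have : K b = true := by rw [hK]; simp [hbB]
    simp [this]
  have hhead : (R.filter K).filter (fun i => decide (i < b)) = P.filter K := by
    rw [hKfilt, List.filter_append, List.filter_cons]
    have hp : (P.filter K).filter (fun i => decide (i < b)) = P.filter K :=
      List.filter_eq_self.mpr (fun x hx => by
        simpa using hPmem x (List.mem_of_mem_filter hx))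
    have hs : (S.filter K).filter (fun i => decide (i < b)) = [] :=
      List.filter_eq_nil_iff.mpr (fun x hx => by
        simpa using not_lt.mpr (le_of_lt (hSmem x (List.mem_of_mem_filter hx))))
    simp [hp, hs]
  have htail : (R.filter K).filter (fun i => decide (b ≤ i)) = b :: S.filter K := by
    rw [hKfilt, List.filter_append, List.filter_cons]
    have hp : (P.filter K).filter (fun i => decide (b ≤ i)) = [] :=
      List.filter_eq_nil_iff.mpr (fun x hx => by
        simpa using not_le.mpr (hPmem x (List.mem_of_mem_filter hx)))
    have hs : (S.filter K).filter (fun i => decide (b ≤ i)) = S.filter K :=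
      List.filter_eq_self.mpr (fun x hx => by
        simpa using le_of_lt (hSmem x (List.mem_of_mem_filter hx)))
    simp [hp, hs]
  rw [hhead, htail]
  simp

-- the head/tail pair of A equals the head/tail pair of B
theorem pv_ht_eq (words preds : List String) :
    BERT_return_entity words preds = pvAltHT words preds := by
  simp only [BERT_return_entity, pvAltHT]
  rw [pv_count]
  rw [pv_bidxs_len]
  set c := preds.countP (fun s => PySem.Str.isIn "B-" s) with hc
  by_cases h0 : c = 0
  · rw [if_pos (show (c : Int) = 0 by exact_mod_cast h0), if_pos h0]
  · rw [if_neg (show ¬(c : Int) = 0 by exact_mod_cast h0), if_neg h0]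
    by_cases h1 : c = 1
    · rw [if_pos (show (c : Int) = 1 by exact_mod_cast h1), if_pos h1]
      rw [pv_branch1]
    · rw [if_neg (show ¬(c : Int) = 1 by exact_mod_cast h1), if_neg h1]
      by_cases h2 : c = 2
      · rw [if_pos (show (c : Int) = 2 by exact_mod_cast h2), if_pos h2]
        exact pv_branch2 words preds (hc ▸ h2)
      · rw [if_neg (show ¬(c : Int) = 2 by exact_mod_cast h2), if_neg h2]

-- the rows of A and B agree
theorem pv_row_eq (grp : List (List String)) :
    [("sentence", PySem.Str.join " " (PySem.List.pyGetD grp 0 [])),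
     ("head", (BERT_return_entity (PySem.List.pyGetD grp 0 []) (PySem.List.pyGetD grp 1 [])).1),
     ("tail", (BERT_return_entity (PySem.List.pyGetD grp 0 []) (PySem.List.pyGetD grp 1 [])).2)]
      = pvFmtGroup grp := by
  rw [pvFmtGroup_eq, pv_ht_eq]

-- ===== VERDICT (by name: the statement is the Claim_ definition above) =====
theorem format_bert_ner_spec : Claim_equal_format_bert_ner := by
  intro input _ _
  unfold Spec_format_bert_ner format_bert_ner format_bert_ner_alt
  rw [PySem.List.foldl_pyRange_zero_pyGetD' input []
        (fun acc grp =>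
          acc ++ [[("sentence", PySem.Str.join " " (PySem.List.pyGetD grp 0 [])),
                   ("head", (BERT_return_entity (PySem.List.pyGetD grp 0 [])
                              (PySem.List.pyGetD grp 1 [])).1),
                   ("tail", (BERT_return_entity (PySem.List.pyGetD grp 0 [])
                              (PySem.List.pyGetD grp 1 [])).2)]]) []]
  rw [PySem.List.foldl_append_singleton_eq_map, PySem.List.foldl_append_singleton_eq_map]
  simp only [List.nil_append]
  exact List.map_congr_left (fun grp _ => pv_row_eq grp)
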